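-- pv_equiv track=rewrite | github.com/SweetSalt974/projet_graphe | src/tsp.py | get_edge_from_perm
-- ===== SOURCE A (Python) =====
-- def get_edge_from_perm(perm, edge_paths={}):
--     l = []
--     for edge in zip(perm[:-1], perm[1:]):
--         if edge in edge_paths:
--             l += get_edge_from_perm(edge_paths[edge])
--         else:
--             l += [edge]
--     return l
-- ===== SOURCE B (Python) =====
-- def get_edge_from_perm(perm, edge_paths={}):
--     l = []
--     for edge in zip(perm[:-1], perm[1:]):
--         if edge in edge_paths:
--             sub = edge_paths[edge]
--             for e in zip(sub[:-1], sub[1:]):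
--                 l.append(e)
--         else:
--             l.append(edge)
--     return l
-- ===== Notes on version B (the rewrite author's own statement) =====
-- stated objective: simpler
-- what changed: Replaces A's self-recursion (which is effectively one level deep because the recursive call uses the default empty dict) with a single iterative pass that inlines the expansion of a mapped edge as a direct nested loop over the sub-path's consecutive pairs, appending elements instead of concatenating lists.
import Mathlib
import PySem

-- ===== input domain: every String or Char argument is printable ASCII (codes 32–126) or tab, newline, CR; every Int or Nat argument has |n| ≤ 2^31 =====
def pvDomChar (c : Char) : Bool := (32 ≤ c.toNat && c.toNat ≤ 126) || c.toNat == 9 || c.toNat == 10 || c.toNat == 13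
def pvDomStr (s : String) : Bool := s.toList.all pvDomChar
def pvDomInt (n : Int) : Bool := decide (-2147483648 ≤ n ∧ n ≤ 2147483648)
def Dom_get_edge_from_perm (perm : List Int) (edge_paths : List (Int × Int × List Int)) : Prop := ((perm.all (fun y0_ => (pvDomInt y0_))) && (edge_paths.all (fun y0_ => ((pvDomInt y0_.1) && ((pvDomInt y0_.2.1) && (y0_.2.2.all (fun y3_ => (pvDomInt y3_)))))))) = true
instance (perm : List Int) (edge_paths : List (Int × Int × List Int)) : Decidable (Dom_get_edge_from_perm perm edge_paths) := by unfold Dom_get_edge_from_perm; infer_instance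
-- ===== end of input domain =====

-- B replaces A's self-recursion (effectively one level deep, since the recursive call
-- uses the default empty dict) by one iterative pass with an explicit nested loop.

-- shared dict primitive: Python 'edge in edge_paths' / 'edge_paths[edge]' on the
-- dict[(int,int), list[int]] given as an association list (duplicate keys: last wins,
-- as in Python dict construction)
def pvLookup (ep : List (Int × Int × List Int)) (edge : Int × Int) : Option (List Int) :=
  PySem.Dict.get? (PySem.Dict.ofList (ep.map fun e => ((e.1, e.2.1), e.2.2))) edge

theorem pvLookup_nil (edge : Int × Int) : pvLookup [] edge = none := rfl

-- ===== PORT A =====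
mutual
  -- literal port of A: for edge in zip(perm[:-1], perm[1:]): recurse on mapped edges
  def get_edge_from_perm (perm : List Int) (edge_paths : List (Int × Int × List Int)) : List (Int × Int) :=
    pvLoopA (List.zip perm.dropLast (perm.drop 1)) edge_paths []
  termination_by (edge_paths.length, 1, 0)
  decreasing_by
    exact Prod.Lex.right _ (Prod.Lex.left _ _ (by omega))
  def pvLoopA : List (Int × Int) → List (Int × Int × List Int) → List (Int × Int) → List (Int × Int)
    | [], _, l => l
    | edge :: rest, ep, l =>
      match h : pvLookup ep edge with
      | some sub => pvLoopA rest ep (l ++ get_edge_from_perm sub [])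
      | none => pvLoopA rest ep (l ++ [edge])
  termination_by edges ep l => (ep.length, 0, edges.length)
  decreasing_by
    all_goals first
    | exact Prod.Lex.right _ (Prod.Lex.right _ (by simp))
    | (refine Prod.Lex.left _ _ ?_
       rcases ep with _ | ⟨e, ep'⟩
       · exact absurd h (by simp [pvLookup_nil])
       · simp)
end

-- ===== PORT B =====
-- literal port of B: one pass; a mapped edge is expanded in place by a nested loop
-- over the sub-path's consecutive pairs
def get_edge_from_perm_alt (perm : List Int) (edge_paths : List (Int × Int × List Int)) : List (Int × Int) :=
  (List.zip perm.dropLast (perm.drop 1)).foldl (fun l edge =>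
    match pvLookup edge_paths edge with
    | some sub => (List.zip sub.dropLast (sub.drop 1)).foldl (fun acc e => acc ++ [e]) l
    | none => l ++ [edge]) []

-- ===== PRECONDITION & SPEC =====
def Spec_get_edge_from_perm (perm : List Int) (edge_paths : List (Int × Int × List Int)) (out : List (Int × Int)) : Prop := out = get_edge_from_perm_alt perm edge_paths
instance (perm : List Int) (edge_paths : List (Int × Int × List Int)) (out : List (Int × Int)) : Decidable (Spec_get_edge_from_perm perm edge_paths out) := by unfold Spec_get_edge_from_perm; infer_instance

-- ===== CLAIM (what is proved, stated in full; the proofs are below) =====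
def Claim_equal_get_edge_from_perm : Prop := ∀ (perm : List Int) (edge_paths : List (Int × Int × List Int)), Dom_get_edge_from_perm perm edge_paths → Spec_get_edge_from_perm perm edge_paths (get_edge_from_perm perm edge_paths)

-- ===== LEMMAS AND PROOFS =====
theorem foldl_append_singleton (xs : List (Int × Int)) (l : List (Int × Int)) :
    xs.foldl (fun acc e => acc ++ [e]) l = l ++ xs := by
  induction xs generalizing l with
  | nil => simp
  | cons x xs ih => simp [List.foldl, ih]

theorem pvLoopA_nil_dict (edges : List (Int × Int)) (l : List (Int × Int)) :
    pvLoopA edges [] l = l ++ edges := by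
  induction edges generalizing l with
  | nil => simp [pvLoopA]
  | cons e rest ih => simp [pvLoopA, pvLookup_nil, ih]

theorem pvLoopA_eq_foldl (edges : List (Int × Int)) (ep : List (Int × Int × List Int))
    (l : List (Int × Int)) :
    pvLoopA edges ep l = edges.foldl (fun l edge =>
      match pvLookup ep edge with
      | some sub => (List.zip sub.dropLast (sub.drop 1)).foldl (fun acc e => acc ++ [e]) l
      | none => l ++ [edge]) l := by
  induction edges generalizing l with
  | nil => simp [pvLoopA]
  | cons edge rest ih =>
    rw [pvLoopA, List.foldl]
    rcases h : pvLookup ep edge with _ | sub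
    · simp [h, ih]
    · simp only [h, ih, get_edge_from_perm, pvLoopA_nil_dict, foldl_append_singleton,
        List.nil_append]

-- ===== VERDICT (by name: the statement is the Claim_ definition above) =====
theorem get_edge_from_perm_spec : Claim_equal_get_edge_from_perm := by
  intro perm ep _
  unfold Spec_get_edge_from_perm get_edge_from_perm get_edge_from_perm_alt
  exact pvLoopA_eq_foldl _ ep []
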